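-- pv_equiv track=rewrite | github.com/p69180/handygenome | src/handygenome/refgenome/refgenome.py | compare_lendicts
-- ===== SOURCE A (Python) =====
-- def compare_lendicts(self_lendict, other_lendict):
--     self_chroms = set(self_lendict.keys())
--     other_chroms = set(other_lendict.keys())
--
--     self_only_chroms = self_chroms.difference(other_chroms)
--     other_only_chroms = other_chroms.difference(self_chroms)
--     common_chroms = self_chroms.intersection(other_chroms)
--     length_matches = all(
--         (self_lendict[x] == other_lendict[x])
--         for x in common_chroms
--     )
--     return length_matches, common_chroms, self_only_chroms, other_only_chroms
-- ===== SOURCE B (Python) =====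
-- def compare_lendicts(self_lendict, other_lendict):
--     # Different algorithm: derive everything from the symmetric difference of
--     # the ITEM sets.  A (key, length) pair lands there iff its key is missing
--     # from one side or the two lengths differ, so no per-key value comparison
--     # is ever performed: length mismatches are detected by counting.
--     diff_pairs = set(self_lendict.items()) ^ set(other_lendict.items())
--     self_only_chroms = {k for k, _ in diff_pairs if k not in other_lendict}
--     other_only_chroms = {k for k, _ in diff_pairs if k not in self_lendict}
--     common_chroms = set(self_lendict.keys()) - self_only_chroms
--     length_matches = (
--         len({k for k, _ in diff_pairs})
--         == len(self_only_chroms) + len(other_only_chroms)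
--     )
--     return length_matches, common_chroms, self_only_chroms, other_only_chroms
-- ===== Notes on version B (the rewrite author's own statement) =====
-- stated objective: alternative
-- what changed: Instead of key-set difference/intersection plus an all() loop comparing lengths per common key, B takes the symmetric difference of the two ITEM sets and derives the only-sets, the common set and the length-matches flag from it by filtering and counting; no length is ever compared directly.
import Mathlib
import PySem

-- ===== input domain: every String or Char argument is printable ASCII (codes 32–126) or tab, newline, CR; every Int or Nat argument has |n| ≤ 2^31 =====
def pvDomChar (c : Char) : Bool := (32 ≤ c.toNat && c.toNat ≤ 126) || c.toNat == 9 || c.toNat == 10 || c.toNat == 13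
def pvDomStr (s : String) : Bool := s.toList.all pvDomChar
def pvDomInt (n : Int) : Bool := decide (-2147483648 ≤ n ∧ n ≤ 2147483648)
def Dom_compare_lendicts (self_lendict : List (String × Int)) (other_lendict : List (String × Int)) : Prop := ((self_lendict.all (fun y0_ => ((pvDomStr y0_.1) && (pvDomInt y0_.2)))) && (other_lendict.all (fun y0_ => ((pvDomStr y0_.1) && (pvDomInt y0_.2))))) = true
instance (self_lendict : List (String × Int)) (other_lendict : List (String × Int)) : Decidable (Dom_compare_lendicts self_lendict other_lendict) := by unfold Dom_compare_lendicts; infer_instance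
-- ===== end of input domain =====

-- B derives the three key sets and the length_matches flag from the symmetric
-- difference of the two ITEM sets (filtering and counting), instead of A's
-- key-set difference/intersection plus a per-common-key all() comparison;
-- objective: alternative. Return value only; no mutation.

-- ===== PORT A =====
-- self_lendict[x] for x in the common keys always succeeds, so the total
-- lookup `(·.lookup x).getD 0` is exact there.
def compare_lendicts (self_lendict : List (String × Int)) (other_lendict : List (String × Int)) : Bool × List String × List String × List String :=
  let self_chroms : PySem.Set String := PySem.Set.ofList (self_lendict.map Prod.fst)
  let other_chroms : PySem.Set String := PySem.Set.ofList (other_lendict.map Prod.fst)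
  let self_only_chroms := PySem.Set.diff self_chroms other_chroms
  let other_only_chroms := PySem.Set.diff other_chroms self_chroms
  let common_chroms := PySem.Set.inter self_chroms other_chroms
  let length_matches := common_chroms.all
    (fun x => (self_lendict.lookup x).getD 0 == (other_lendict.lookup x).getD 0)
  (length_matches, common_chroms, self_only_chroms, other_only_chroms)

-- ===== PORT B =====
-- `k not in other_lendict` (dict membership) is `(other_lendict.lookup k).isSome = false`;
-- the set comprehensions over diff_pairs build Sets, so porting them through the
-- Set's list order is exact as a set.
def compare_lendicts_alt (self_lendict : List (String × Int)) (other_lendict : List (String × Int)) : Bool × List String × List String × List String :=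
  let diff_pairs : PySem.Set (String × Int) :=
    PySem.Set.symmDiff (PySem.Set.ofList self_lendict) (PySem.Set.ofList other_lendict)
  let self_only_chroms : PySem.Set String :=
    PySem.Set.ofList ((diff_pairs.filter (fun p => !(other_lendict.lookup p.1).isSome)).map Prod.fst)
  let other_only_chroms : PySem.Set String :=
    PySem.Set.ofList ((diff_pairs.filter (fun p => !(self_lendict.lookup p.1).isSome)).map Prod.fst)
  let common_chroms :=
    PySem.Set.diff (PySem.Set.ofList (self_lendict.map Prod.fst)) self_only_chroms
  let length_matches :=
    PySem.Set.len (PySem.Set.ofList (diff_pairs.map Prod.fst))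
      == PySem.Set.len self_only_chroms + PySem.Set.len other_only_chroms
  (length_matches, common_chroms, self_only_chroms, other_only_chroms)

-- ===== PRECONDITION & SPEC =====
-- Pre_ excludes association lists with duplicate keys: the Python arguments are
-- dicts, which cannot carry duplicate keys, so such lists represent no Python input.
def Pre_compare_lendicts (self_lendict : List (String × Int)) (other_lendict : List (String × Int)) : Prop :=
  (self_lendict.map Prod.fst).Nodup ∧ (other_lendict.map Prod.fst).Nodup
instance (self_lendict : List (String × Int)) (other_lendict : List (String × Int)) : Decidable (Pre_compare_lendicts self_lendict other_lendict) := by unfold Pre_compare_lendicts; infer_instance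

def pvWitness_compare_lendicts : (List (String × Int)) × (List (String × Int)) :=
  ([("1", 100), ("2", 50)], [("1", 100), ("3", 7)])

def Spec_compare_lendicts (self_lendict : List (String × Int)) (other_lendict : List (String × Int)) (out : Bool × List String × List String × List String) : Prop := out = compare_lendicts_alt self_lendict other_lendict
instance (self_lendict : List (String × Int)) (other_lendict : List (String × Int)) (out : Bool × List String × List String × List String) : Decidable (Spec_compare_lendicts self_lendict other_lendict out) := by unfold Spec_compare_lendicts; infer_instance

-- ===== CLAIM (what is proved, stated in full; the proofs are below) =====
def Claim_equal_compare_lendicts : Prop := ∀ (self_lendict : List (String × Int)) (other_lendict : List (String × Int)), Dom_compare_lendicts self_lendict other_lendict → Pre_compare_lendicts self_lendict other_lendict → Spec_compare_lendicts self_lendict other_lendict (compare_lendicts self_lendict other_lendict)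

-- ===== LEMMAS AND PROOFS =====

-- key membership ↔ successful lookup
theorem pv_lookup_isSome (o : List (String × Int)) (k : String) :
    (o.lookup k).isSome = true ↔ k ∈ o.map Prod.fst := by
  induction o with
  | nil => simp [List.lookup]
  | cons p t ih =>
    simp only [List.lookup, List.map_cons, List.mem_cons]
    cases hb : (k == p.1) with
    | true =>
      simp only [Option.isSome_some, true_iff]
      exact Or.inl (beq_iff_eq.mp hb)
    | false =>
      simp only [ih]
      constructor
      · exact Or.inr
      · rintro (he | hm)
        · rw [he] at hb; simp at hb
        · exact hm

-- with nodup keys, lookup of a member pair returns its value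
theorem pv_lookup_mem (s : List (String × Int)) (hnd : (s.map Prod.fst).Nodup)
    (p : String × Int) (hp : p ∈ s) : s.lookup p.1 = some p.2 := by
  induction s with
  | nil => cases hp
  | cons q t ih =>
    simp only [List.map_cons, List.nodup_cons] at hnd
    rcases List.mem_cons.mp hp with h | h
    · subst h; simp [List.lookup]
    · have hne : (p.1 == q.1) = false := by
        cases hb : (p.1 == q.1) with
        | false => rfl
        | true =>
          exfalso
          have hm : p.1 ∈ t.map Prod.fst := List.mem_map.mpr ⟨p, h, rfl⟩
          rw [beq_iff_eq.mp hb] at hm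
          exact hnd.1 hm
      simp [List.lookup, hne, ih hnd.2 h]

-- a successful lookup comes from a member pair
theorem pv_lookup_some_mem (o : List (String × Int)) (k : String) (v : Int)
    (h : o.lookup k = some v) : (k, v) ∈ o := by
  induction o with
  | nil => simp [List.lookup] at h
  | cons p t ih =>
    simp only [List.lookup] at h
    cases hb : (k == p.1) with
    | true =>
      rw [hb] at h
      simp only [Option.some.injEq] at h
      have : (k, v) = p := by
        have h1 := beq_iff_eq.mp hb
        calc (k, v) = (p.1, p.2) := by rw [h1, h]
        _ = p := rfl
      simp [this]
    | false =>
      rw [hb] at h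
      exact List.mem_cons_of_mem _ (ih h)

-- filtering pairs by a key predicate, then projecting = projecting, then filtering
theorem pv_map_fst_filter (s : List (String × Int)) (c : String → Bool) :
    (s.filter (fun p => c p.1)).map Prod.fst = (s.map Prod.fst).filter c := by
  induction s with
  | nil => rfl
  | cons p t ih =>
    by_cases h : c p.1
    · simp [h, ih]
    · simp [h, ih]

-- length of a filter splits over pointwise-disjoint predicates
theorem pv_split_length (l : List String) (q1 q2 : String → Bool)
    (hd : ∀ x, ¬(q1 x = true ∧ q2 x = true)) :
    (l.filter (fun x => q1 x || q2 x)).length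
      = (l.filter q1).length + (l.filter q2).length := by
  induction l with
  | nil => rfl
  | cons x t ih =>
    simp only [List.filter_cons]
    cases h1 : q1 x with
    | true =>
      have h2 : q2 x = false := by
        cases h2 : q2 x with
        | true => exact absurd ⟨h1, h2⟩ (hd x)
        | false => rfl
      simp [h2, ih]; omega
    | false =>
      cases h2 : q2 x with
      | true => simp [ih]; omega
      | false => simp [ih]

-- contains of a set of keys agrees with lookup success
theorem pv_contains_eq (o : List (String × Int)) (k : String) :
    PySem.Set.contains (PySem.Set.ofList (o.map Prod.fst)) k = (o.lookup k).isSome := by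
  rw [Bool.eq_iff_iff, PySem.Set.contains_iff, PySem.Set.mem_ofList, pv_lookup_isSome]

-- Set.contains is decidable membership
theorem pv_contains_mem {α : Type} [BEq α] [LawfulBEq α] [DecidableEq α]
    (s : List α) (x : α) : PySem.Set.contains s x = decide (x ∈ s) := by
  rw [Bool.eq_iff_iff, PySem.Set.contains_iff, decide_eq_true_iff]

-- pair membership in a nodup-keys dict ↔ lookup value
theorem pv_mem_iff_lookup (o : List (String × Int)) (ho : (o.map Prod.fst).Nodup)
    (p : String × Int) : p ∈ o ↔ o.lookup p.1 = some p.2 :=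
  ⟨fun h => pv_lookup_mem o ho p h, fun h => pv_lookup_some_mem o p.1 p.2 h⟩

-- the self-side of the item symmetric difference, at key level
theorem pv_D1k (s o : List (String × Int)) (hs : (s.map Prod.fst).Nodup)
    (ho : (o.map Prod.fst).Nodup) :
    ((s.filter (fun p => !(decide (p ∈ o)))).map Prod.fst)
      = (s.map Prod.fst).filter (fun k => !(o.lookup k == s.lookup k)) := by
  rw [← pv_map_fst_filter]
  congr 1
  apply List.filter_congr
  intro p hp
  congr 1
  rw [Bool.eq_iff_iff, decide_eq_true_iff, pv_mem_iff_lookup o ho p,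
    pv_lookup_mem s hs p hp, beq_iff_eq]

-- self-side pairs with key absent from other = self-only keys (key level)
theorem pv_so (s o : List (String × Int)) (ho : (o.map Prod.fst).Nodup) :
    (((s.filter (fun p => !(decide (p ∈ o))) ++ o.filter (fun p => !(decide (p ∈ s)))).filter
        (fun p => !(o.lookup p.1).isSome)).map Prod.fst)
      = (s.map Prod.fst).filter (fun k => !(o.lookup k).isSome) := by
  rw [List.filter_append]
  have h2 : (o.filter (fun p => !(decide (p ∈ s)))).filter (fun p => !(o.lookup p.1).isSome) = [] := by
    rw [List.filter_eq_nil_iff]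
    intro p hp
    have hpo : p ∈ o := (List.mem_filter.mp hp).1
    have : (o.lookup p.1).isSome = true :=
      (pv_lookup_isSome o p.1).mpr (List.mem_map.mpr ⟨p, hpo, rfl⟩)
    simp [this]
  rw [h2, List.append_nil, List.filter_filter, ← pv_map_fst_filter]
  congr 1
  apply List.filter_congr
  intro p _
  cases hl : o.lookup p.1 with
  | none =>
    have hno : ¬ p ∈ o := fun hm => by
      rw [pv_lookup_mem o ho p hm] at hl; cases hl
    simp [hno]
  | some v => simp

-- B's common set = keys of self present in other
theorem pv_common (s o : List (String × Int)) (hs : (s.map Prod.fst).Nodup) :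
    PySem.Set.diff (PySem.Set.ofList (s.map Prod.fst))
        ((s.map Prod.fst).filter (fun k => !(o.lookup k).isSome))
      = (s.map Prod.fst).filter (fun k => (o.lookup k).isSome) := by
  show (PySem.Set.ofList (s.map Prod.fst)).filter _ = _
  rw [PySem.Set.ofList_eq_self_of_nodup _ hs]
  apply List.filter_congr
  intro k hk
  rw [pv_contains_mem]
  cases hl : (o.lookup k).isSome with
  | true =>
    have hnm : k ∉ (s.map Prod.fst).filter (fun k => !(o.lookup k).isSome) := by
      intro hm
      have := (List.mem_filter.mp hm).2
      rw [hl] at this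
      cases this
    rw [decide_eq_false hnm]
    rfl
  | false =>
    have hm : k ∈ (s.map Prod.fst).filter (fun k => !(o.lookup k).isSome) :=
      List.mem_filter.mpr ⟨hk, by rw [hl]; rfl⟩
    rw [decide_eq_true hm]
    rfl

-- A's common set, normalised the same way
theorem pv_commonA (s o : List (String × Int)) (hs : (s.map Prod.fst).Nodup) :
    PySem.Set.inter (PySem.Set.ofList (s.map Prod.fst)) (PySem.Set.ofList (o.map Prod.fst))
      = (s.map Prod.fst).filter (fun k => (o.lookup k).isSome) := by
  show (PySem.Set.ofList (s.map Prod.fst)).filter _ = _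
  rw [PySem.Set.ofList_eq_self_of_nodup _ hs]
  exact List.filter_congr (fun k _ => pv_contains_eq o k)

-- A's diff sets, normalised
theorem pv_diffA (s o : List (String × Int)) (hs : (s.map Prod.fst).Nodup) :
    PySem.Set.diff (PySem.Set.ofList (s.map Prod.fst)) (PySem.Set.ofList (o.map Prod.fst))
      = (s.map Prod.fst).filter (fun k => !(o.lookup k).isSome) := by
  show (PySem.Set.ofList (s.map Prod.fst)).filter _ = _
  rw [PySem.Set.ofList_eq_self_of_nodup _ hs]
  exact List.filter_congr (fun k _ => by rw [pv_contains_eq o k])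

-- other-side pairs with key absent from self = other-only keys (key level)
theorem pv_oo (s o : List (String × Int)) (hs : (s.map Prod.fst).Nodup) :
    (((s.filter (fun p => !(decide (p ∈ o))) ++ o.filter (fun p => !(decide (p ∈ s)))).filter
        (fun p => !(s.lookup p.1).isSome)).map Prod.fst)
      = (o.map Prod.fst).filter (fun k => !(s.lookup k).isSome) := by
  rw [List.filter_append]
  have h1 : (s.filter (fun p => !(decide (p ∈ o)))).filter (fun p => !(s.lookup p.1).isSome) = [] := by
    rw [List.filter_eq_nil_iff]
    intro p hp
    have hps : p ∈ s := (List.mem_filter.mp hp).1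
    have : (s.lookup p.1).isSome = true :=
      (pv_lookup_isSome s p.1).mpr (List.mem_map.mpr ⟨p, hps, rfl⟩)
    simp [this]
  rw [h1, List.nil_append, List.filter_filter, ← pv_map_fst_filter]
  congr 1
  apply List.filter_congr
  intro p _
  cases hl : s.lookup p.1 with
  | none =>
    have hno : ¬ p ∈ s := fun hm => by
      rw [pv_lookup_mem s hs p hm] at hl; cases hl
    simp [hno]
  | some v => simp

-- filtering the other-side mismatch keys by non-membership in the self-side
-- mismatch keys leaves exactly the other-only keys
theorem pv_S2filter (s o : List (String × Int)) :
    ((o.map Prod.fst).filter (fun k => !(s.lookup k == o.lookup k))).filter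
        (fun y => !(PySem.Set.contains
          ((s.map Prod.fst).filter (fun k => !(o.lookup k == s.lookup k))) y))
      = (o.map Prod.fst).filter (fun k => !(s.lookup k).isSome) := by
  rw [List.filter_filter]
  apply List.filter_congr
  intro k hk
  have hos : (o.lookup k).isSome = true := (pv_lookup_isSome o k).mpr hk
  obtain ⟨b, hob⟩ := Option.isSome_iff_exists.mp hos
  cases hsl : s.lookup k with
  | none =>
    have hks : k ∉ s.map Prod.fst := fun h => by
      have := (pv_lookup_isSome s k).mpr h; rw [hsl] at this; cases this
    have hnm : k ∉ (s.map Prod.fst).filter (fun k => !(o.lookup k == s.lookup k)) :=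
      fun h => hks (List.mem_filter.mp h).1
    rw [pv_contains_mem, decide_eq_false hnm, hob]
    rfl
  | some a =>
    have hks : k ∈ s.map Prod.fst := (pv_lookup_isSome s k).mp (by rw [hsl]; rfl)
    by_cases hab : b = a
    · rw [hob, hab]
      simp
    · have hmem : k ∈ (s.map Prod.fst).filter (fun k => !(o.lookup k == s.lookup k)) :=
        List.mem_filter.mpr ⟨hks, by rw [hob, hsl]; simp [hab]⟩
      rw [pv_contains_mem, decide_eq_true hmem]
      rfl

-- the self-side mismatch keys split into self-only keys and common mismatched keys
theorem pv_S1klen (s o : List (String × Int)) :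
    ((s.map Prod.fst).filter (fun k => !(o.lookup k == s.lookup k))).length
      = ((s.map Prod.fst).filter (fun k => !(o.lookup k).isSome)).length
        + ((s.map Prod.fst).filter
            (fun k => (o.lookup k).isSome && !(o.lookup k == s.lookup k))).length := by
  rw [show (s.map Prod.fst).filter (fun k => !(o.lookup k == s.lookup k))
      = (s.map Prod.fst).filter (fun k =>
          (!(o.lookup k).isSome) || ((o.lookup k).isSome && !(o.lookup k == s.lookup k)))
      from List.filter_congr ?_]
  · apply pv_split_length
    intro x ⟨h1, h2⟩
    rw [Bool.not_eq_eq_eq_not, Bool.not_true] at h1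
    rw [Bool.and_eq_true] at h2
    rw [h2.1] at h1
    cases h1
  · intro k hk
    have : (s.lookup k).isSome = true := (pv_lookup_isSome s k).mpr hk
    obtain ⟨a, hsl⟩ := Option.isSome_iff_exists.mp this
    cases hol : o.lookup k with
    | none => rw [hsl]; rfl
    | some b => simp

-- the length_matches booleans agree
theorem pv_bool (s o : List (String × Int)) :
    (((s.map Prod.fst).filter (fun k => (o.lookup k).isSome)).all
        (fun x => (s.lookup x).getD 0 == (o.lookup x).getD 0))
      = ((((s.map Prod.fst).filter (fun k => !(o.lookup k == s.lookup k))).length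
          + ((o.map Prod.fst).filter (fun k => !(s.lookup k).isSome)).length)
        == (((s.map Prod.fst).filter (fun k => !(o.lookup k).isSome)).length
          + ((o.map Prod.fst).filter (fun k => !(s.lookup k).isSome)).length)) := by
  rw [pv_S1klen s o, Bool.eq_iff_iff, List.all_eq_true, beq_iff_eq]
  constructor
  · intro hall
    have hnil : (s.map Prod.fst).filter
        (fun k => (o.lookup k).isSome && !(o.lookup k == s.lookup k)) = [] := by
      rw [List.filter_eq_nil_iff]
      intro k hk hcontra
      rw [Bool.and_eq_true] at hcontra
      obtain ⟨hos, hdif⟩ := hcontra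
      have := hall k (List.mem_filter.mpr ⟨hk, hos⟩)
      obtain ⟨a, hsl⟩ := Option.isSome_iff_exists.mp ((pv_lookup_isSome s k).mpr hk)
      obtain ⟨b, hol⟩ := Option.isSome_iff_exists.mp hos
      rw [hsl, hol] at this hdif
      simp only [Option.getD_some, beq_iff_eq] at this
      rw [this] at hdif
      simp at hdif
    rw [hnil]
    simp
  · intro hlen
    have hc : ((s.map Prod.fst).filter
        (fun k => (o.lookup k).isSome && !(o.lookup k == s.lookup k))).length = 0 := by omega
    rw [List.length_eq_zero_iff, List.filter_eq_nil_iff] at hc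
    intro x hx
    obtain ⟨hxs, hos⟩ := List.mem_filter.mp hx
    have hnd := hc x hxs
    obtain ⟨a, hsl⟩ := Option.isSome_iff_exists.mp ((pv_lookup_isSome s x).mpr hxs)
    obtain ⟨b, hol⟩ := Option.isSome_iff_exists.mp hos
    rw [hol, hsl] at hnd ⊢
    simp only [Option.isSome_some, Bool.true_and, Bool.not_eq_true', beq_eq_false_iff_ne,
      ne_eq, Decidable.not_not, Option.some.injEq] at hnd
    simp [hnd]

-- ===== VERDICT (by name: the statement is the Claim_ definition above) =====
theorem compare_lendicts_spec : Claim_equal_compare_lendicts := by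
  intro s o _ hpre
  obtain ⟨hs, ho⟩ := hpre
  show compare_lendicts s o = compare_lendicts_alt s o
  have hsn : s.Nodup := List.Nodup.of_map _ hs
  have hon : o.Nodup := List.Nodup.of_map _ ho
  simp only [compare_lendicts, compare_lendicts_alt, PySem.Set.len]
  rw [PySem.Set.ofList_eq_self_of_nodup s hsn, PySem.Set.ofList_eq_self_of_nodup o hon]
  have hsd : PySem.Set.symmDiff s o
      = s.filter (fun p => !(decide (p ∈ o))) ++ o.filter (fun p => !(decide (p ∈ s))) := by
    show s.filter _ ++ o.filter _ = _
    congr 1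
    · exact List.filter_congr (fun p _ => by rw [pv_contains_mem])
    · exact List.filter_congr (fun p _ => by rw [pv_contains_mem])
  rw [hsd, pv_so s o ho, pv_oo s o hs, List.map_append,
    pv_D1k s o hs ho, pv_D1k o s ho hs, PySem.Set.ofList_append,
    PySem.Set.ofList_eq_self_of_nodup _ (hs.filter _),
    PySem.Set.ofList_eq_self_of_nodup _ (hs.filter _),
    PySem.Set.ofList_eq_self_of_nodup _ (ho.filter _),
    PySem.Set.update_eq_append_filter,
    PySem.Set.ofList_eq_self_of_nodup _ (ho.filter _),
    pv_S2filter s o, List.length_append,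
    pv_commonA s o hs, pv_common s o hs, pv_diffA s o hs, pv_diffA o s ho,
    pv_bool s o]
  congr 1
  rw [Bool.eq_iff_iff, beq_iff_eq, beq_iff_eq]
  push_cast
  omega
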